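-- pv_equiv track=rewrite | github.com/athenarc/fc4eosc-nlsearch | darelabdb/nlp_metrics/utils/execution_accuracy_calculator.py | _valid_final_mapping
-- ===== SOURCE A (Python) =====
-- from collections import Counter
--
-- def _valid_final_mapping(possible_mappings: dict) -> bool:
--     """
--     Checks if a mapping dictionary is valid. A mapping is considered valid if all keys are mapped to 1 or 0 values and
--     no value exists more than one times.
--     """
--     if not all([len(possible_mappings[i]) <= 1 for i in range(len(possible_mappings))]):
--         return False
--
--     # Check that there are no duplicates except for None
--     values_count = Counter(
--         list([value[0] if len(value) else None for value in possible_mappings.values()])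
--     )
--     if None in values_count.keys():
--         values_count.pop(None)
--
--     if any(value_count > 1 for value_count in values_count.values()):
--         return False
--
--     return True
-- ===== SOURCE B (Python) =====
-- def _valid_final_mapping(possible_mappings: dict) -> bool:
--     # One pass over the values (fetched in key order 0..n-1): reject a >1-sized value list
--     # or a repeated first element; empty lists never clash.
--     values = [possible_mappings[i] for i in range(len(possible_mappings))]
--     seen = set()
--     for value in values:
--         if len(value) > 1:
--             return False
--         if value:
--             v = value[0]
--             if v in seen:
--                 return False
--             seen.add(v)
--     return True
-- ===== Notes on version B (the rewrite author's own statement) =====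
-- stated objective: simpler
-- what changed: Replaced A's two separate passes (an all() comprehension over indices, then a Counter of head values with the None key popped and an any() over counts) by a single indexed loop that keeps a set of already-seen first elements and returns False on the first oversized or duplicated value.
import Mathlib
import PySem

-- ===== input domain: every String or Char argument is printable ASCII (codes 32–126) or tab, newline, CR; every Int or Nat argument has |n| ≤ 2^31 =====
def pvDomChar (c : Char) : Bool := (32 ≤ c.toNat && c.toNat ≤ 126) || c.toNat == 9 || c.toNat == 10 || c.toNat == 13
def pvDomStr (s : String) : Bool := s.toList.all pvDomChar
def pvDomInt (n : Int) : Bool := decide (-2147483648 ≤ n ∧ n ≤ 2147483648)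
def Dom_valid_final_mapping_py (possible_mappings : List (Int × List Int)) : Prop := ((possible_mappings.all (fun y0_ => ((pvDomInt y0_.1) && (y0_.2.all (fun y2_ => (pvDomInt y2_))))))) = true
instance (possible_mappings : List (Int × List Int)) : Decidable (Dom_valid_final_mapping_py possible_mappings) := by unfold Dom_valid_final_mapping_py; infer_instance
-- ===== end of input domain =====

-- B replaces A's two passes (index comprehension + Counter with None popped) by one indexed
-- loop over a seen-set of first elements; objective: simpler.

-- ===== PORT A =====
def valid_final_mapping_py (possible_mappings : List (Int × List Int)) : Bool :=
  let d := PySem.Dict.mk possible_mappings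
  -- if not all([len(possible_mappings[i]) <= 1 for i in range(len(possible_mappings))]): return False
  if !((PySem.List.pyRange 0 (possible_mappings.length : Int) 1).all
        (fun i => decide ((d.getD i []).length ≤ 1))) then
    false
  else
    -- values_count = Counter([value[0] if len(value) else None for value in possible_mappings.values()])
    let values_count := PySem.Dict.counter
      (d.values.map (fun value => match value with | [] => (none : Option Int) | v :: _ => some v))
    -- if None in values_count.keys(): values_count.pop(None)   (the popped count is discarded)
    let values_count := if values_count.contains none then values_count.erase none else values_count
    if values_count.values.any (fun value_count => 1 < value_count) then false
    else true

-- ===== PORT B =====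
-- values = [possible_mappings[i] for i in range(len(possible_mappings))]; then one pass with a seen-set
def pyAltLoop (seen : PySem.Set Int) : List (List Int) → Bool
  | [] => true
  | value :: rest =>
    if 1 < value.length then false
    else
      match value with
      | [] => pyAltLoop seen rest
      | v :: _ =>
        if PySem.Set.contains seen v then false
        else pyAltLoop (PySem.Set.add seen v) rest

def valid_final_mapping_py_alt (possible_mappings : List (Int × List Int)) : Bool :=
  let d := PySem.Dict.mk possible_mappings
  pyAltLoop PySem.Set.empty
    ((PySem.List.pyRange 0 (possible_mappings.length : Int) 1).map (fun i => d.getD i []))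

-- ===== PRECONDITION & SPEC =====
-- Pre_ excludes association lists with duplicate keys (they do not represent a Python dict) and
-- dicts whose keys are not exactly 0..n-1, on which A raises KeyError at possible_mappings[i].
def Pre_valid_final_mapping_py (possible_mappings : List (Int × List Int)) : Prop :=
  (possible_mappings.map Prod.fst).Nodup ∧
  ∀ i ∈ PySem.List.pyRange 0 (possible_mappings.length : Int) 1, i ∈ possible_mappings.map Prod.fst
instance (possible_mappings : List (Int × List Int)) : Decidable (Pre_valid_final_mapping_py possible_mappings) := by unfold Pre_valid_final_mapping_py; infer_instance

def pvWitness_valid_final_mapping_py : (List (Int × List Int)) := [(0, [5]), (1, []), (2, [7])]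

def Spec_valid_final_mapping_py (possible_mappings : List (Int × List Int)) (out : Bool) : Prop := out = valid_final_mapping_py_alt possible_mappings
instance (possible_mappings : List (Int × List Int)) (out : Bool) : Decidable (Spec_valid_final_mapping_py possible_mappings out) := by unfold Spec_valid_final_mapping_py; infer_instance

-- ===== CLAIM (what is proved, stated in full; the proofs are below) =====
def Claim_equal_valid_final_mapping_py : Prop := ∀ (possible_mappings : List (Int × List Int)), Dom_valid_final_mapping_py possible_mappings → Pre_valid_final_mapping_py possible_mappings → Spec_valid_final_mapping_py possible_mappings (valid_final_mapping_py possible_mappings)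

-- ===== LEMMAS AND PROOFS =====

-- counting a `some` through `filterMap id`
lemma count_filterMap_id_some (l : List (Option Int)) (v : Int) :
    (l.filterMap id).count v = l.count (some v) := by
  induction l with
  | nil => rfl
  | cons a t ih =>
    cases a <;> simp_all [List.count_cons]

-- B's loop returns true iff every value is short and the first elements (with `seen`) are distinct
lemma pyAltLoop_true_iff (l : List (List Int)) (seen : PySem.Set Int)
    (hs : seen.Nodup) :
    pyAltLoop seen l = true ↔
      (∀ value ∈ l, value.length ≤ 1) ∧ (seen ++ l.filterMap List.head?).Nodup := by
  induction l generalizing seen with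
  | nil => simp [pyAltLoop, hs]
  | cons value rest ih =>
    simp only [pyAltLoop]
    by_cases hlong : 1 < value.length
    · rw [if_pos hlong]
      constructor
      · intro h; cases h
      · rintro ⟨h1, -⟩
        have := h1 value (List.mem_cons_self)
        omega
    · rw [if_neg hlong]
      cases value with
      | nil =>
        rw [ih seen hs]
        simp
      | cons v tail =>
        have htail : tail = [] := by
          simpa using hlong
        subst htail
        by_cases hmem : v ∈ seen
        · have hcv : PySem.Set.contains seen v = true := by simp [hmem]
          show (if PySem.Set.contains seen v = true then false
                else pyAltLoop (PySem.Set.add seen v) rest) = true ↔ _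
          rw [if_pos hcv]
          constructor
          · intro h; cases h
          · rintro ⟨-, h2⟩
            simp only [List.filterMap_cons, List.head?_cons] at h2
            have hdisj := (List.nodup_append.mp h2).2.2
            exact (hdisj v hmem v List.mem_cons_self rfl).elim
        · have hcv : PySem.Set.contains seen v = false := by simp [hmem]
          show (if PySem.Set.contains seen v = true then false
                else pyAltLoop (PySem.Set.add seen v) rest) = true ↔ _
          rw [if_neg (by simpa using hmem)]
          rw [PySem.Set.add_of_not_mem hmem]
          rw [ih (seen ++ [v])
              (hs.append (List.nodup_singleton v) ((List.disjoint_singleton).mpr hmem))]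
          rw [List.forall_mem_cons]
          simp [List.append_assoc]

-- A returns true iff every value is short and no non-None head value repeats
lemma portA_true_iff (pm : List (Int × List Int)) :
    valid_final_mapping_py pm = true ↔
      (∀ i ∈ PySem.List.pyRange 0 (pm.length : Int) 1,
          ((PySem.Dict.mk pm).getD i []).length ≤ 1) ∧
      (∀ v : Int,
        ((PySem.Dict.mk pm).values.map List.head?).count (some v) ≤ 1) := by
  unfold valid_final_mapping_py
  set d := PySem.Dict.mk pm with hd
  have hmatch : (fun (value : List Int) => match value with
      | [] => (none : Option Int) | v :: _ => some v) = List.head? := by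
    funext value; cases value <;> rfl
  rw [hmatch]
  set vals := d.values.map List.head? with hvals
  by_cases hall : (PySem.List.pyRange 0 (pm.length : Int) 1).all
      (fun i => decide ((d.getD i []).length ≤ 1))
  · simp only [hall, Bool.not_true, Bool.false_eq_true, if_false]
    have hallP : ∀ i ∈ PySem.List.pyRange 0 (pm.length : Int) 1, (d.getD i []).length ≤ 1 := by
      intro i hi; simpa using List.all_eq_true.mp hall i hi
    have hcnt : ∀ (c : PySem.Dict (Option Int) Int),
        c = (if (PySem.Dict.counter vals).contains none
             then (PySem.Dict.counter vals).erase none else PySem.Dict.counter vals) →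
        ((c.values.any (fun value_count => 1 < value_count)) = false ↔
          ∀ v : Int, vals.count (some v) ≤ 1) := by
      intro c hc
      have hvaleq : c.values.any (fun value_count => 1 < value_count) = false ↔
          ∀ k ∈ PySem.Set.ofList vals, k ≠ (none : Option Int) → (vals.count k : Int) ≤ 1 := by
        by_cases hnone : (PySem.Dict.counter vals).contains none
        · rw [hc, if_pos hnone]
          show (((PySem.Dict.counter vals).items.filter _).map Prod.snd).any _ = false ↔ _
          rw [PySem.Dict.items_counter]
          simp only [List.filter_map, List.map_map, List.any_eq_false, List.mem_map,
            List.mem_filter, Function.comp]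
          constructor
          · intro h k hk hne
            by_contra hgt
            exact h ((vals.count k : Int))
              ⟨k, ⟨hk, by simp [Option.isSome_iff_ne_none, hne]⟩, rfl⟩
              (by simp only [decide_eq_true_eq]; omega)
          · rintro h x ⟨k, ⟨hk, hkne⟩, rfl⟩
            have hne : k ≠ none := Option.ne_none_iff_isSome.mpr (by simpa using hkne)
            simp only [decide_eq_true_eq]
            have := h k hk hne
            omega
        · rw [hc, if_neg hnone]
          show (((PySem.Dict.counter vals).items).map Prod.snd).any _ = false ↔ _
          rw [PySem.Dict.items_counter]
          simp only [List.map_map, List.any_eq_false, List.mem_map, Function.comp]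
          have hnm : (none : Option Int) ∉ vals := by
            intro hmem
            apply hnone
            rw [PySem.Dict.contains_counter]
            simpa using hmem
          constructor
          · intro h k hk _
            by_contra hgt
            exact h ((vals.count k : Int)) ⟨k, hk, rfl⟩
              (by simp only [decide_eq_true_eq]; omega)
          · rintro h x ⟨k, hk, rfl⟩
            simp only [decide_eq_true_eq]
            have hkne : k ≠ none := by
              rintro rfl
              exact hnm (by simpa using hk)
            have := h k hk hkne
            omega
      rw [hvaleq]
      constructor
      · intro h v
        by_cases hv : (some v) ∈ vals
        · have := h (some v) (by simpa using hv) (by simp)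
          exact_mod_cast this
        · simp [List.count_eq_zero_of_not_mem hv]
      · intro h k hk hne
        cases k with
        | none => exact absurd rfl hne
        | some v => exact_mod_cast h v
    rcases hcnt _ rfl with hiff
    constructor
    · intro h
      refine ⟨hallP, ?_⟩
      by_cases hany : (if (PySem.Dict.counter vals).contains none
             then (PySem.Dict.counter vals).erase none else PySem.Dict.counter vals).values.any
             (fun value_count => 1 < value_count)
      · rw [if_pos hany] at h; exact absurd h (by simp)
      · exact hiff.mp (by simpa using hany)
    · rintro ⟨-, h2⟩
      rw [if_neg (by rw [hiff.mpr h2]; simp)]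
  · simp only [hall, Bool.not_false, if_true]
    constructor
    · intro h; exact absurd h (by simp)
    · rintro ⟨h1, -⟩
      exfalso
      apply hall
      exact List.all_eq_true.mpr (fun i hi => by simpa using h1 i hi)

-- under Pre_, the keys of the dict are a permutation of range(n)
lemma keys_perm (pm : List (Int × List Int)) (hpre : Pre_valid_final_mapping_py pm) :
    (pm.map Prod.fst).Perm (PySem.List.pyRange 0 (pm.length : Int) 1) := by
  rcases hpre with ⟨hnd, hsub⟩
  have hsp : (PySem.List.pyRange 0 (pm.length : Int) 1).Subperm (pm.map Prod.fst) :=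
    List.subperm_of_subset (PySem.List.nodup_pyRange_one 0 (pm.length : Int)) hsub
  have hlen : (pm.map Prod.fst).length ≤ (PySem.List.pyRange 0 (pm.length : Int) 1).length := by
    rw [PySem.List.length_pyRange_one]; simp
  exact (hsp.perm_of_length_le hlen).symm

-- ===== VERDICT (by name: the statement is the Claim_ definition above) =====
theorem valid_final_mapping_py_spec : Claim_equal_valid_final_mapping_py := by
  intro pm _ hpre
  unfold Spec_valid_final_mapping_py
  set d := PySem.Dict.mk pm with hd
  set R := PySem.List.pyRange 0 (pm.length : Int) 1 with hR
  have hkeys : d.keys = pm.map Prod.fst := rfl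
  have hperm : d.keys.Perm R := by rw [hkeys]; exact keys_perm pm hpre
  have hvals : d.values = d.keys.map (fun k => d.getD k []) :=
    PySem.Dict.values_eq_map_keys d (by rw [hkeys]; exact hpre.1) []
  have hvperm : (d.values.map List.head?).Perm (R.map (fun i => (d.getD i []).head?)) := by
    rw [hvals, List.map_map]
    have := hperm.map (fun k => (d.getD k []).head?)
    simpa [Function.comp] using this
  have hBiff := pyAltLoop_true_iff (R.map (fun i => d.getD i [])) PySem.Set.empty List.nodup_nil
  have hAiff := portA_true_iff pm
  rw [Bool.eq_iff_iff]
  unfold valid_final_mapping_py_alt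
  rw [← hd, ← hR, hBiff, hAiff]
  have heq : (R.map (fun i => d.getD i [])).filterMap List.head? =
      (R.map (fun i => (d.getD i []).head?)).filterMap id := by
    rw [List.filterMap_map, List.filterMap_map]; rfl
  constructor
  · rintro ⟨h1, h2⟩
    constructor
    · intro value hv
      rcases List.mem_map.mp hv with ⟨i, hi, rfl⟩
      exact h1 i hi
    · have hnd : ((R.map (fun i => d.getD i [])).filterMap List.head?).Nodup := by
        rw [heq, List.nodup_iff_count_le_one]
        intro a
        rw [count_filterMap_id_some, ← hvperm.count_eq (some a)]
        exact h2 a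
      simpa [PySem.Set.empty] using hnd
  · rintro ⟨h1, h2⟩
    constructor
    · intro i hi
      exact h1 _ (List.mem_map_of_mem hi)
    · intro v
      have hnd : ((R.map (fun i => d.getD i [])).filterMap List.head?).Nodup := by
        simpa [PySem.Set.empty] using h2
      rw [heq, List.nodup_iff_count_le_one] at hnd
      have := hnd v
      rw [count_filterMap_id_some, ← hvperm.count_eq (some v)] at this
      exact this
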